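-- pv_equiv track=rewrite | github.com/sahilk267/aaditech-ufo | server/services/ai_service.py | _parse_root_cause_response
-- ===== SOURCE A (Python) =====
-- from typing import Any
--
-- def _parse_root_cause_response(response_text: str) -> dict[str, Any]:
--     """Parse normalized root-cause response from Ollama output."""
--     parsed_root_cause = ''
--     parsed_confidence = 'low'
--     parsed_rationale = ''
--
--     for raw_line in str(response_text).splitlines():
--         line = raw_line.strip()
--         lower = line.lower()
--         if lower.startswith('rootcause:') or lower.startswith('root_cause:'):
--             parsed_root_cause = line.split(':', 1)[1].strip()
--             continue
--         if lower.startswith('confidence:'):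
--             parsed_confidence = line.split(':', 1)[1].strip().lower()
--             continue
--         if lower.startswith('rationale:'):
--             parsed_rationale = line.split(':', 1)[1].strip()
--
--     if parsed_confidence not in {'high', 'medium', 'low'}:
--         parsed_confidence = 'low'
--
--     if not parsed_root_cause:
--         parsed_root_cause = str(response_text).strip().split('\n', 1)[0][:180] or 'unknown'
--
--     if not parsed_rationale:
--         parsed_rationale = str(response_text).strip()[:300]
--
--     return {
--         'probable_cause': parsed_root_cause,
--         'confidence': parsed_confidence,
--         'rationale': parsed_rationale,
--         'analyzer_version': 'foundation-v1',
--     }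
-- ===== SOURCE B (Python) =====
-- def _last_field(lines, prefixes):
--     """Value of the last line whose lowercased stripped form starts with one of the prefixes."""
--     for raw in reversed(lines):
--         line = raw.strip()
--         if line.lower().startswith(prefixes):
--             return line.split(':', 1)[1].strip()
--     return None
--
--
-- def _parse_root_cause_response(response_text: str) -> dict:
--     """Parse normalized root-cause response from Ollama output."""
--     lines = str(response_text).splitlines()
--
--     root = _last_field(lines, ('rootcause:', 'root_cause:')) or ''
--     conf = _last_field(lines, ('confidence:',))
--     conf = conf.lower() if conf is not None else 'low'
--     if conf not in ('high', 'medium', 'low'):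
--         conf = 'low'
--     rationale = _last_field(lines, ('rationale:',)) or ''
--
--     if not root:
--         root = str(response_text).strip().split('\n', 1)[0][:180] or 'unknown'
--     if not rationale:
--         rationale = str(response_text).strip()[:300]
--
--     return {
--         'probable_cause': root,
--         'confidence': conf,
--         'rationale': rationale,
--         'analyzer_version': 'foundation-v1',
--     }
-- ===== Notes on version B (the rewrite author's own statement) =====
-- stated objective: alternative
-- what changed: Replaces A's single forward pass with three mutable accumulators and continue-chained prefix branches by a helper that scans reversed(lines) and returns the first (i.e. last-in-document) matching field value, called once per field; the whitelist and fallbacks are then applied to the three lookups.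
import Mathlib
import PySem

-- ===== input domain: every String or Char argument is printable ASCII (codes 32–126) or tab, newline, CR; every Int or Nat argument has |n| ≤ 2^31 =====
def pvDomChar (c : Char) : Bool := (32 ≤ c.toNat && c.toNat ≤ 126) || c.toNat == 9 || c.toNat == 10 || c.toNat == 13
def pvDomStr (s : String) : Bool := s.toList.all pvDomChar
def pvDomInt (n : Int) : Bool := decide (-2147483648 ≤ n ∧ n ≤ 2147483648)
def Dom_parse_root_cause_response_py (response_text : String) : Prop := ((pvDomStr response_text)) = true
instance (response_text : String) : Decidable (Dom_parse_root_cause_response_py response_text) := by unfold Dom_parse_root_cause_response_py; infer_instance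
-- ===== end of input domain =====

-- B replaces A's single three-accumulator forward fold by three independent reverse scans,
-- each returning the first (i.e. last-in-document) matching field line (objective: alternative decomposition, same cost).


-- ===== PORT A =====
-- line.split(':', 1)[1].strip()  (both Pythons contain this exact expression; the [1]
-- index is only reached on lines that contain ':', so the "" default is never used there)
def pvFieldVal (line : String) : String :=
  PySem.Str.strip (((PySem.Str.splitMax? line ":" 1).getD []).getD 1 "")

def parse_root_cause_response_py (response_text : String) : List (String × String) :=
  -- state: (parsed_root_cause, parsed_confidence, parsed_rationale)
  let st :=
    (PySem.Str.splitlines response_text).foldl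
      (fun (acc : String × String × String) raw_line =>
        let line := PySem.Str.strip raw_line
        let lower := PySem.Str.lower line
        if PySem.Str.startswith lower "rootcause:" || PySem.Str.startswith lower "root_cause:" then
          (pvFieldVal line, acc.2.1, acc.2.2)
        else if PySem.Str.startswith lower "confidence:" then
          (acc.1, PySem.Str.lower (pvFieldVal line), acc.2.2)
        else if PySem.Str.startswith lower "rationale:" then
          (acc.1, acc.2.1, pvFieldVal line)
        else acc)
      ("", "low", "")
  let parsed_confidence :=
    if st.2.1 = "high" ∨ st.2.1 = "medium" ∨ st.2.1 = "low" then st.2.1 else "low"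
  let parsed_root_cause :=
    if st.1 = "" then
      let first := PySem.Str.slice (((PySem.Str.splitMax? (PySem.Str.strip response_text) "\n" 1).getD []).getD 0 "") none (some 180)
      if first = "" then "unknown" else first
    else st.1
  let parsed_rationale :=
    if st.2.2 = "" then PySem.Str.slice (PySem.Str.strip response_text) none (some 300) else st.2.2
  [("probable_cause", parsed_root_cause), ("confidence", parsed_confidence),
   ("rationale", parsed_rationale), ("analyzer_version", "foundation-v1")]

-- ===== PORT B =====
-- _last_field: first match over reversed(lines); returns the value part of that line
def pvLastField (lines : List String) (prefixes : List String) : Option String :=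
  (lines.reverse.find?
      (fun raw => prefixes.any (fun p => PySem.Str.startswith (PySem.Str.lower (PySem.Str.strip raw)) p))).map
    (fun raw => pvFieldVal (PySem.Str.strip raw))

def parse_root_cause_response_py_alt (response_text : String) : List (String × String) :=
  let lines := PySem.Str.splitlines response_text
  let root0 := (pvLastField lines ["rootcause:", "root_cause:"]).getD ""
  let conf0 := match pvLastField lines ["confidence:"] with
               | some c => PySem.Str.lower c
               | none => "low"
  let conf := if conf0 = "high" ∨ conf0 = "medium" ∨ conf0 = "low" then conf0 else "low"
  let rationale0 := (pvLastField lines ["rationale:"]).getD ""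
  let root :=
    if root0 = "" then
      let first := PySem.Str.slice (((PySem.Str.splitMax? (PySem.Str.strip response_text) "\n" 1).getD []).getD 0 "") none (some 180)
      if first = "" then "unknown" else first
    else root0
  let rationale :=
    if rationale0 = "" then PySem.Str.slice (PySem.Str.strip response_text) none (some 300) else rationale0
  [("probable_cause", root), ("confidence", conf),
   ("rationale", rationale), ("analyzer_version", "foundation-v1")]

-- ===== PRECONDITION & SPEC =====
def Spec_parse_root_cause_response_py (response_text : String) (out : List (String × String)) : Prop := out = parse_root_cause_response_py_alt response_text
instance (response_text : String) (out : List (String × String)) : Decidable (Spec_parse_root_cause_response_py response_text out) := by unfold Spec_parse_root_cause_response_py; infer_instance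

-- ===== CLAIM (what is proved, stated in full; the proofs are below) =====
def Claim_equal_parse_root_cause_response_py : Prop := ∀ (response_text : String), Dom_parse_root_cause_response_py response_text → Spec_parse_root_cause_response_py response_text (parse_root_cause_response_py response_text)

-- ===== LEMMAS AND PROOFS =====

-- a "last match wins" forward fold is a first match over the reversed list
theorem pv_foldl_lastwins {α β : Type} (p : α → Bool) (f : α → β) (l : List α) (init : β) :
    l.foldl (fun acc x => if p x then f x else acc) init =
      (match l.reverse.find? p with | some x => f x | none => init) := by
  induction l generalizing init with
  | nil => simp
  | cons x t ih =>
      simp only [List.foldl_cons, List.reverse_cons, List.find?_append, ih]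
      cases t.reverse.find? p
      · simp only [List.find?]
        cases hx : p x <;> simp
      · simp

-- two incomparable literal prefixes cannot both start the same string
theorem pv_startswith_excl (s p q : String)
    (hpq : ¬ (p.toList <+: q.toList)) (hqp : ¬ (q.toList <+: p.toList))
    (hp : PySem.Str.startswith s p = true) : PySem.Str.startswith s q = false := by
  cases hq : PySem.Str.startswith s q with
  | false => rfl
  | true =>
      exfalso
      rw [PySem.Str.startswith_eq] at hp hq
      rcases List.prefix_or_prefix_of_prefix ((PySem.Chars.startswith_iff _ _).mp hp)
        ((PySem.Chars.startswith_iff _ _).mp hq) with h | h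
      · exact hpq h
      · exact hqp h

-- the three field predicates
def pvP1 (x : String) : Bool :=
  PySem.Str.startswith (PySem.Str.lower (PySem.Str.strip x)) "rootcause:" ||
    PySem.Str.startswith (PySem.Str.lower (PySem.Str.strip x)) "root_cause:"
def pvP2 (x : String) : Bool := PySem.Str.startswith (PySem.Str.lower (PySem.Str.strip x)) "confidence:"
def pvP3 (x : String) : Bool := PySem.Str.startswith (PySem.Str.lower (PySem.Str.strip x)) "rationale:"

theorem pvP1_excl2 (x : String) (h : pvP1 x = true) : pvP2 x = false := by
  unfold pvP1 at h; unfold pvP2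
  rcases Bool.or_eq_true_iff.mp h with h1 | h1
  · exact pv_startswith_excl _ _ _ (by decide) (by decide) h1
  · exact pv_startswith_excl _ _ _ (by decide) (by decide) h1

theorem pvP1_excl3 (x : String) (h : pvP1 x = true) : pvP3 x = false := by
  unfold pvP1 at h; unfold pvP3
  rcases Bool.or_eq_true_iff.mp h with h1 | h1
  · exact pv_startswith_excl _ _ _ (by decide) (by decide) h1
  · exact pv_startswith_excl _ _ _ (by decide) (by decide) h1

theorem pvP2_excl3 (x : String) (h : pvP2 x = true) : pvP3 x = false :=
  pv_startswith_excl _ _ _ (by decide) (by decide) h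

-- A's step function acts independently on the three accumulator components
theorem pv_step_eq :
    (fun (acc : String × String × String) raw_line =>
        let line := PySem.Str.strip raw_line
        let lower := PySem.Str.lower line
        if PySem.Str.startswith lower "rootcause:" || PySem.Str.startswith lower "root_cause:" then
          (pvFieldVal line, acc.2.1, acc.2.2)
        else if PySem.Str.startswith lower "confidence:" then
          (acc.1, PySem.Str.lower (pvFieldVal line), acc.2.2)
        else if PySem.Str.startswith lower "rationale:" then
          (acc.1, acc.2.1, pvFieldVal line)
        else acc) =
      (fun (acc : String × String × String) x =>
        ((if pvP1 x then pvFieldVal (PySem.Str.strip x) else acc.1),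
         (if pvP2 x then PySem.Str.lower (pvFieldVal (PySem.Str.strip x)) else acc.2.1),
         (if pvP3 x then pvFieldVal (PySem.Str.strip x) else acc.2.2))) := by
  funext acc x
  show (if pvP1 x then _ else if pvP2 x then _ else if pvP3 x then _ else acc) = _
  cases h1 : pvP1 x with
  | true => simp [pvP1_excl2 x h1, pvP1_excl3 x h1]
  | false =>
      cases h2 : pvP2 x with
      | true => simp [pvP2_excl3 x h2]
      | false => cases h3 : pvP3 x <;> simp [*]

-- the fold of A computed field-by-field, as B computes them
theorem pv_fold_eq (L : List String) :
    L.foldl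
      (fun (acc : String × String × String) raw_line =>
        let line := PySem.Str.strip raw_line
        let lower := PySem.Str.lower line
        if PySem.Str.startswith lower "rootcause:" || PySem.Str.startswith lower "root_cause:" then
          (pvFieldVal line, acc.2.1, acc.2.2)
        else if PySem.Str.startswith lower "confidence:" then
          (acc.1, PySem.Str.lower (pvFieldVal line), acc.2.2)
        else if PySem.Str.startswith lower "rationale:" then
          (acc.1, acc.2.1, pvFieldVal line)
        else acc)
      ("", "low", "") =
      ((pvLastField L ["rootcause:", "root_cause:"]).getD "",
       (match pvLastField L ["confidence:"] with
        | some c => PySem.Str.lower c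
        | none => "low"),
       (pvLastField L ["rationale:"]).getD "") := by
  rw [pv_step_eq]
  rw [PySem.List.foldl_prod_mk
        (f := fun (a : String) x => if pvP1 x then pvFieldVal (PySem.Str.strip x) else a)
        (g := fun (t : String × String) x =>
          ((if pvP2 x then PySem.Str.lower (pvFieldVal (PySem.Str.strip x)) else t.1),
           (if pvP3 x then pvFieldVal (PySem.Str.strip x) else t.2)))]
  rw [PySem.List.foldl_prod_mk
        (f := fun (a : String) x => if pvP2 x then PySem.Str.lower (pvFieldVal (PySem.Str.strip x)) else a)
        (g := fun (a : String) x => if pvP3 x then pvFieldVal (PySem.Str.strip x) else a)]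
  rw [pv_foldl_lastwins, pv_foldl_lastwins, pv_foldl_lastwins]
  have e1 : (fun raw => List.any ["rootcause:", "root_cause:"]
      (fun p => PySem.Str.startswith (PySem.Str.lower (PySem.Str.strip raw)) p)) = pvP1 := by
    funext raw; simp [pvP1]
  have e2 : (fun raw => List.any ["confidence:"]
      (fun p => PySem.Str.startswith (PySem.Str.lower (PySem.Str.strip raw)) p)) = pvP2 := by
    funext raw; simp [pvP2]
  have e3 : (fun raw => List.any ["rationale:"]
      (fun p => PySem.Str.startswith (PySem.Str.lower (PySem.Str.strip raw)) p)) = pvP3 := by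
    funext raw; simp [pvP3]
  unfold pvLastField
  rw [e1, e2, e3]
  refine Prod.ext ?_ (Prod.ext ?_ ?_)
  · cases h : List.find? pvP1 L.reverse <;> simp [h]
  · cases h : List.find? pvP2 L.reverse <;> simp
  · cases h : List.find? pvP3 L.reverse <;> simp

-- ===== VERDICT (by name: the statement is the Claim_ definition above) =====
theorem parse_root_cause_response_py_spec : Claim_equal_parse_root_cause_response_py := by
  intro s _
  unfold Spec_parse_root_cause_response_py parse_root_cause_response_py parse_root_cause_response_py_alt
  rw [pv_fold_eq]
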